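-- pv_equiv track=rewrite | github.com/Med-Dev-99/OCR_Pipeline | API_pipeline/table_extraction/table_extraction_functions.py | group_dicts_by_keys
-- ===== SOURCE A (Python) =====
-- def group_dicts_by_keys(data):
--     grouped_data = []
--     current_group = []
--
--     for item in data:
--         if not current_group or set(current_group[0].keys()) == set(item.keys()):
--             current_group.append(item)
--         else:
--             grouped_data.append(current_group)
--             current_group = [item]
--
--     if current_group:
--         grouped_data.append(current_group)
--
--     return grouped_data
-- ===== SOURCE B (Python) =====
-- def group_dicts_by_keys(data):
--     groups = []
--     i, n = 0, len(data)
--     while i < n: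
--         sig = frozenset(data[i].keys())
--         j = i + 1
--         while j < n and sig == frozenset(data[j].keys()):
--             j += 1
--         groups.append(data[i:j])
--         i = j
--     return groups
-- ===== Notes on version B (the rewrite author's own statement) =====
-- stated objective: simpler
-- what changed: Replaced A's accumulator/flush state machine (per-item compare to the current group's head, flush on mismatch, final flush) with a span scan: take each maximal run of identical key-signatures and slice it off directly.
import Mathlib
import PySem

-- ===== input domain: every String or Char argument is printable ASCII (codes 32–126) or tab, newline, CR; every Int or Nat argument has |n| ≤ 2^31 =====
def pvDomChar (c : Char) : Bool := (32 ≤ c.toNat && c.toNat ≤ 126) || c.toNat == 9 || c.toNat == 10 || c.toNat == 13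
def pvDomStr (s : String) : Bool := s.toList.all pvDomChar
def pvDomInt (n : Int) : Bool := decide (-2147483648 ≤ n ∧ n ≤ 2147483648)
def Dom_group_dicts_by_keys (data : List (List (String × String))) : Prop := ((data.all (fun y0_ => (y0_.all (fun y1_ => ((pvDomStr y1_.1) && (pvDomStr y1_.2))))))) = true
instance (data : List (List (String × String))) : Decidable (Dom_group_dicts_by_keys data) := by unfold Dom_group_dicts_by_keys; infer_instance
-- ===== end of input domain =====

-- B replaces A's accumulator/flush state machine with a span scan over maximal runs of
-- equal key-signatures (objective: simpler).

-- set(d.keys()) / frozenset(d.keys()) of a dict given as an association list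
def pvKeySet (d : List (String × String)) : PySem.Set String :=
  PySem.Set.ofList (d.map Prod.fst)

-- Python's 'set(d.keys()) == set(e.keys())' / 'sig == frozenset(e.keys())'
def pvSigEq (d e : List (String × String)) : Bool :=
  PySem.Set.equal (pvKeySet d) (pvKeySet e)

-- ===== PORT A =====
-- the for-loop of A, state = (grouped_data, current_group), plus the final flush
def gdkLoop : List (List (String × String)) → List (List (List (String × String))) →
    List (List (String × String)) → List (List (List (String × String)))
  | [], g, c => if c = [] then g else g ++ [c]
  | item :: rest, g, c =>
    match c with
    | [] => gdkLoop rest g [item]          -- 'not current_group' short-circuits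
    | x :: cs =>
      if pvSigEq x item then gdkLoop rest g ((x :: cs) ++ [item])
      else gdkLoop rest (g ++ [x :: cs]) [item]

def group_dicts_by_keys (data : List (List (String × String))) : List (List (List (String × String))) :=
  gdkLoop data [] []

-- ===== PORT B =====
-- inner while loop = span of the run whose signature equals sig; outer while = suffix recursion
def group_dicts_by_keys_alt : List (List (String × String)) → List (List (List (String × String)))
  | [] => []
  | d :: rest =>
    (d :: rest.takeWhile (pvSigEq d)) :: group_dicts_by_keys_alt (rest.dropWhile (pvSigEq d))
termination_by l => l.length
decreasing_by
  exact Nat.lt_succ_of_le (List.length_dropWhile_le _ _)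

-- ===== PRECONDITION & SPEC =====
def Spec_group_dicts_by_keys (data : List (List (String × String))) (out : List (List (List (String × String)))) : Prop := out = group_dicts_by_keys_alt data
instance (data : List (List (String × String))) (out : List (List (List (String × String)))) : Decidable (Spec_group_dicts_by_keys data out) := by unfold Spec_group_dicts_by_keys; infer_instance

-- ===== CLAIM (what is proved, stated in full; the proofs are below) =====
def Claim_equal_group_dicts_by_keys : Prop := ∀ (data : List (List (String × String))), Dom_group_dicts_by_keys data → Spec_group_dicts_by_keys data (group_dicts_by_keys data)

-- ===== LEMMAS AND PROOFS =====

-- the accumulator g is only ever appended to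
theorem gdkLoop_acc (data : List (List (String × String)))
    (g : List (List (List (String × String)))) (c : List (List (String × String))) :
    gdkLoop data g c = g ++ gdkLoop data [] c := by
  induction data generalizing g c with
  | nil => simp only [gdkLoop]; split <;> simp
  | cons item rest ih =>
    cases c with
    | nil =>
      simp only [gdkLoop]
      rw [ih g [item], ih [] [item]]
    | cons x cs =>
      simp only [gdkLoop]
      split
      · rw [ih g ((x :: cs) ++ [item]), ih [] ((x :: cs) ++ [item])]
      · rw [ih (g ++ [x :: cs]) [item], ih ([] ++ [x :: cs]) [item]]
        simp

-- while every incoming item matches the group head x, A keeps appending to the current group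
theorem gdkLoop_run (tk dr : List (List (String × String)))
    (x : List (String × String)) (cs : List (List (String × String)))
    (h : ∀ e ∈ tk, pvSigEq x e = true) :
    gdkLoop (tk ++ dr) [] (x :: cs) = gdkLoop dr [] (x :: (cs ++ tk)) := by
  induction tk generalizing cs with
  | nil => simp
  | cons e tk' ih =>
    simp only [List.cons_append, gdkLoop]
    rw [if_pos (h e (by simp))]
    have := ih (cs ++ [e]) (fun e' he' => h e' (by simp [he']))
    simpa using this

-- the first element A keeps out of the current group fails the signature test
theorem dropWhile_head_false {α : Type} (p : α → Bool) (l : List α) (h : α) (t : List α)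
    (hdr : l.dropWhile p = h :: t) : p h = false := by
  induction l with
  | nil => simp at hdr
  | cons a l ih =>
    rw [List.dropWhile_cons] at hdr
    split at hdr
    · exact ih hdr
    · cases hdr; simpa using ‹¬ _ = true›

theorem gdk_main : ∀ data, group_dicts_by_keys data = group_dicts_by_keys_alt data
  | [] => by simp [group_dicts_by_keys, gdkLoop, group_dicts_by_keys_alt]
  | d :: rest => by
    have ih := gdk_main (rest.dropWhile (pvSigEq d))
    have key : gdkLoop rest [] [d]
        = gdkLoop (rest.dropWhile (pvSigEq d)) [] (d :: rest.takeWhile (pvSigEq d)) := by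
      conv_lhs => rw [← List.takeWhile_append_dropWhile (p := pvSigEq d) (l := rest)]
      have := gdkLoop_run (rest.takeWhile (pvSigEq d)) (rest.dropWhile (pvSigEq d)) d []
        (fun e he => List.mem_takeWhile_imp he)
      simpa using this
    show gdkLoop (d :: rest) [] [] = _
    rw [show gdkLoop (d :: rest) [] [] = gdkLoop rest [] [d] from rfl, key,
      group_dicts_by_keys_alt]
    cases hdr : rest.dropWhile (pvSigEq d) with
    | nil => simp [gdkLoop, group_dicts_by_keys_alt]
    | cons h t =>
      have hph : pvSigEq d h = false := dropWhile_head_false _ _ _ _ hdr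
      simp only [gdkLoop]
      rw [if_neg (by simp [hph]), gdkLoop_acc]
      rw [show gdkLoop t [] [h] = gdkLoop (h :: t) [] [] from rfl, ← hdr]
      unfold group_dicts_by_keys at ih
      rw [ih]
      simp
termination_by data => data.length
decreasing_by
  exact Nat.lt_succ_of_le (List.length_dropWhile_le _ _)

-- ===== VERDICT (by name: the statement is the Claim_ definition above) =====
theorem group_dicts_by_keys_spec : Claim_equal_group_dicts_by_keys := by
  intro data _
  unfold Spec_group_dicts_by_keys
  exact gdk_main data
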